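-- pv_equiv track=rewrite | github.com/sadbody123/CUHKSZ-GroupDiscussionSystem | app/audio/analysis/scoring/rubric_mapper.py | rubric_tags_for_signals
-- ===== SOURCE A (Python) =====
-- from typing import Any
--
-- def rubric_tags_for_signals(signals: list[dict[str, Any]]) -> dict[str, list[str]]:
--     out: dict[str, list[str]] = {
--         "Fluency": [],
--         "Delivery": [],
--         "Pronunciation clarity (proxy)": [],
--         "Volume / pace (proxy)": [],
--     }
--     for s in signals:
--         sid = str(s.get("signal_id", ""))
--         msg = str(s.get("message", ""))
--         if "pause" in sid or "pause" in msg.lower():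
--             out["Fluency"].append(sid)
--         if "filler" in sid:
--             out["Delivery"].append(sid)
--         if "rate" in sid or "wpm" in sid:
--             out["Volume / pace (proxy)"].append(sid)
--         if "volume" in sid or "rms" in msg.lower():
--             out["Volume / pace (proxy)"].append(sid)
--         if "confidence" in sid or "pronunciation" in msg.lower():
--             out["Pronunciation clarity (proxy)"].append(sid)
--     return {k: list(dict.fromkeys(v)) for k, v in out.items() if v}
-- ===== SOURCE B (Python) =====
-- from typing import Any
--
--
-- def rubric_tags_for_signals(signals: list[dict[str, Any]]) -> dict[str, list[str]]:
--     # One filtering pass per rubric tag; the two Volume/pace conditions are folded into one OR.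
--     def sid(s):
--         return str(s.get("signal_id", ""))
--
--     def msg(s):
--         return str(s.get("message", "")).lower()
--
--     buckets = {
--         "Fluency": [sid(s) for s in signals
--                     if "pause" in sid(s) or "pause" in msg(s)],
--         "Delivery": [sid(s) for s in signals if "filler" in sid(s)],
--         "Pronunciation clarity (proxy)": [sid(s) for s in signals
--                                           if "confidence" in sid(s) or "pronunciation" in msg(s)],
--         "Volume / pace (proxy)": [sid(s) for s in signals
--                                   if "rate" in sid(s) or "wpm" in sid(s)
--                                   or "volume" in sid(s) or "rms" in msg(s)],
--     }
--     return {k: list(dict.fromkeys(v)) for k, v in buckets.items() if v}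
-- ===== Notes on version B (the rewrite author's own statement) =====
-- stated objective: alternative
-- what changed: Replaces the single loop that mutates four dict buckets per signal with one independent filter-and-map comprehension per rubric tag, merging the two separate Volume/pace conditions into a single OR predicate (the double append A can do there collapses under the shared dict.fromkeys dedup).
import Mathlib
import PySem

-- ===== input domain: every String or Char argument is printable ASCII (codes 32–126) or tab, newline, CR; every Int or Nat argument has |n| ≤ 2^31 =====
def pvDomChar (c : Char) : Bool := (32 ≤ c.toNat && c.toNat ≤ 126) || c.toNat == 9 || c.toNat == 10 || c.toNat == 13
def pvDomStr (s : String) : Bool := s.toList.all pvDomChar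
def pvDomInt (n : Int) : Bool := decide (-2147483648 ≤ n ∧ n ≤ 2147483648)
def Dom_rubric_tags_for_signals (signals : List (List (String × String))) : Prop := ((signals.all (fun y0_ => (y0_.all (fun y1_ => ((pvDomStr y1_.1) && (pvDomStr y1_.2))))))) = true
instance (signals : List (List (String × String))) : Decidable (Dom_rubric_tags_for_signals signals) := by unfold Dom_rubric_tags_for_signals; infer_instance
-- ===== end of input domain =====

-- B replaces A's single bucket-mutating loop with one independent filter-and-map pass per rubric
-- tag (the two Volume/pace conditions folded into one OR); alternative decomposition, same cost.


-- shared helper: d.get(k, dflt) on an association-list dict (first match)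
def pvGet (s : List (String × String)) (k dflt : String) : String :=
  match s.find? (fun p => p.1 == k) with
  | some p => p.2
  | none => dflt

-- ===== PORT A =====
-- one iteration of A's loop: the five 'if …: out[tag].append(sid)' statements
def pvStepA (out : PySem.Dict String (List String)) (s : List (String × String)) :
    PySem.Dict String (List String) :=
  let sid := pvGet s "signal_id" ""
  let msg := pvGet s "message" ""
  let out := if PySem.Str.isIn "pause" sid || PySem.Str.isIn "pause" (PySem.Str.lower msg) then
    out.modify "Fluency" [] (· ++ [sid]) else out
  let out := if PySem.Str.isIn "filler" sid then
    out.modify "Delivery" [] (· ++ [sid]) else out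
  let out := if PySem.Str.isIn "rate" sid || PySem.Str.isIn "wpm" sid then
    out.modify "Volume / pace (proxy)" [] (· ++ [sid]) else out
  let out := if PySem.Str.isIn "volume" sid || PySem.Str.isIn "rms" (PySem.Str.lower msg) then
    out.modify "Volume / pace (proxy)" [] (· ++ [sid]) else out
  let out := if PySem.Str.isIn "confidence" sid || PySem.Str.isIn "pronunciation" (PySem.Str.lower msg) then
    out.modify "Pronunciation clarity (proxy)" [] (· ++ [sid]) else out
  out

def rubric_tags_for_signals (signals : List (List (String × String))) : List (String × List String) :=
  let out0 : PySem.Dict String (List String) := PySem.Dict.ofList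
    [("Fluency", []), ("Delivery", []), ("Pronunciation clarity (proxy)", []), ("Volume / pace (proxy)", [])]
  let out := signals.foldl pvStepA out0
  (out.items.filter (fun kv => !kv.2.isEmpty)).map (fun kv => (kv.1, PySem.List.dedup kv.2))

-- ===== PORT B =====
def pvSid (s : List (String × String)) : String := pvGet s "signal_id" ""
def pvMsg (s : List (String × String)) : String := PySem.Str.lower (pvGet s "message" "")

def rubric_tags_for_signals_alt (signals : List (List (String × String))) : List (String × List String) :=
  let buckets : List (String × List String) :=
    [("Fluency",
       (signals.filter (fun s => PySem.Str.isIn "pause" (pvSid s) || PySem.Str.isIn "pause" (pvMsg s))).map pvSid),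
     ("Delivery",
       (signals.filter (fun s => PySem.Str.isIn "filler" (pvSid s))).map pvSid),
     ("Pronunciation clarity (proxy)",
       (signals.filter (fun s => PySem.Str.isIn "confidence" (pvSid s) || PySem.Str.isIn "pronunciation" (pvMsg s))).map pvSid),
     ("Volume / pace (proxy)",
       (signals.filter (fun s => PySem.Str.isIn "rate" (pvSid s) || PySem.Str.isIn "wpm" (pvSid s) ||
                                 PySem.Str.isIn "volume" (pvSid s) || PySem.Str.isIn "rms" (pvMsg s))).map pvSid)]
  (buckets.filter (fun kv => !kv.2.isEmpty)).map (fun kv => (kv.1, PySem.List.dedup kv.2))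

-- ===== PRECONDITION & SPEC =====
def Spec_rubric_tags_for_signals (signals : List (List (String × String))) (out : List (String × List String)) : Prop := out = rubric_tags_for_signals_alt signals
instance (signals : List (List (String × String))) (out : List (String × List String)) : Decidable (Spec_rubric_tags_for_signals signals out) := by unfold Spec_rubric_tags_for_signals; infer_instance

-- ===== CLAIM (what is proved, stated in full; the proofs are below) =====
def Claim_equal_rubric_tags_for_signals : Prop := ∀ (signals : List (List (String × String))), Dom_rubric_tags_for_signals signals → Spec_rubric_tags_for_signals signals (rubric_tags_for_signals signals)

-- ===== LEMMAS AND PROOFS =====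

-- A's two separate Volume/pace appends, as the per-signal contribution to that bucket
def pvVolOne (s : List (String × String)) : List String :=
  (if PySem.Str.isIn "rate" (pvSid s) || PySem.Str.isIn "wpm" (pvSid s) then [pvSid s] else []) ++
  (if PySem.Str.isIn "volume" (pvSid s) || PySem.Str.isIn "rms" (pvMsg s) then [pvSid s] else [])

theorem pv_set_add_add {α : Type} [BEq α] [LawfulBEq α] (t : List α) (x : α) :
    PySem.Set.add (PySem.Set.add t x) x = PySem.Set.add t x := by
  by_cases h : x ∈ t <;> simp [PySem.Set.add, PySem.Set.contains, h]

-- set-inserting up to two copies of f s per element = inserting once per OR-filtered element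
theorem pv_fold_add2 {α : Type} (c1 c2 : α → Bool) (f : α → String) (l : List α)
    (acc : PySem.Set String) :
    (l.flatMap (fun s => (if c1 s then [f s] else []) ++ (if c2 s then [f s] else []))).foldl
        PySem.Set.add acc
      = ((l.filter (fun s => c1 s || c2 s)).map f).foldl PySem.Set.add acc := by
  induction l generalizing acc with
  | nil => rfl
  | cons s t ih =>
      by_cases h1 : c1 s <;> by_cases h2 : c2 s <;>
        simp [h1, h2, List.foldl_append, ih, pv_set_add_add]

theorem pv_empty2 {α : Type} (c1 c2 : α → Bool) (f : α → String) (l : List α) :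
    (l.flatMap (fun s => (if c1 s then [f s] else []) ++ (if c2 s then [f s] else []))).isEmpty
      = ((l.filter (fun s => c1 s || c2 s)).map f).isEmpty := by
  induction l with
  | nil => rfl
  | cons s t ih => by_cases h1 : c1 s <;> by_cases h2 : c2 s <;> simp_all

theorem pv_stepA_eq (s : List (String × String)) (a b c d : List String) :
    pvStepA (PySem.Dict.mk [("Fluency", a), ("Delivery", b), ("Pronunciation clarity (proxy)", c), ("Volume / pace (proxy)", d)]) s =
    PySem.Dict.mk [("Fluency", a ++ (if PySem.Str.isIn "pause" (pvSid s) || PySem.Str.isIn "pause" (pvMsg s) then [pvSid s] else [])),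
      ("Delivery", b ++ (if PySem.Str.isIn "filler" (pvSid s) then [pvSid s] else [])),
      ("Pronunciation clarity (proxy)", c ++ (if PySem.Str.isIn "confidence" (pvSid s) || PySem.Str.isIn "pronunciation" (pvMsg s) then [pvSid s] else [])),
      ("Volume / pace (proxy)", d ++ pvVolOne s)] := by
  simp only [pvStepA, pvSid, pvMsg, pvVolOne]
  split_ifs <;> simp [PySem.Dict.modify, PySem.Dict.insert, PySem.Dict.getD, PySem.Dict.get?, PySem.Dict.contains]

-- invariant: A's loop appends, bucket by bucket, exactly the per-tag filtered sids
theorem pv_loopA (l : List (List (String × String))) (a b c d : List String) :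
    l.foldl pvStepA (PySem.Dict.mk [("Fluency", a), ("Delivery", b), ("Pronunciation clarity (proxy)", c), ("Volume / pace (proxy)", d)]) =
    PySem.Dict.mk [("Fluency", a ++ (l.filter (fun s => PySem.Str.isIn "pause" (pvSid s) || PySem.Str.isIn "pause" (pvMsg s))).map pvSid),
      ("Delivery", b ++ (l.filter (fun s => PySem.Str.isIn "filler" (pvSid s))).map pvSid),
      ("Pronunciation clarity (proxy)", c ++ (l.filter (fun s => PySem.Str.isIn "confidence" (pvSid s) || PySem.Str.isIn "pronunciation" (pvMsg s))).map pvSid),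
      ("Volume / pace (proxy)", d ++ l.flatMap pvVolOne)] := by
  induction l generalizing a b c d with
  | nil => simp
  | cons s t ih =>
      rw [List.foldl_cons, pv_stepA_eq, ih]
      simp [List.filter_cons, List.map_cons]
      split_ifs <;> simp

theorem pv_vol_dedup (l : List (List (String × String))) :
    PySem.List.dedup (l.flatMap pvVolOne) =
    PySem.List.dedup ((l.filter (fun s => PySem.Str.isIn "rate" (pvSid s) || PySem.Str.isIn "wpm" (pvSid s) ||
        PySem.Str.isIn "volume" (pvSid s) || PySem.Str.isIn "rms" (pvMsg s))).map pvSid) := by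
  have h := pv_fold_add2 (fun s => PySem.Str.isIn "rate" (pvSid s) || PySem.Str.isIn "wpm" (pvSid s))
    (fun s => PySem.Str.isIn "volume" (pvSid s) || PySem.Str.isIn "rms" (pvMsg s)) pvSid l []
  simp only [PySem.List.dedup_eq_ofList, PySem.Set.ofList_eq_foldl]
  rw [show (l.flatMap pvVolOne) = l.flatMap (fun s => (if PySem.Str.isIn "rate" (pvSid s) || PySem.Str.isIn "wpm" (pvSid s) then [pvSid s] else []) ++ (if PySem.Str.isIn "volume" (pvSid s) || PySem.Str.isIn "rms" (pvMsg s) then [pvSid s] else [])) from rfl, h]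
  congr 2
  apply List.filter_congr
  intro s _
  cases PySem.Str.isIn "rate" (pvSid s) <;> cases PySem.Str.isIn "wpm" (pvSid s) <;> simp

theorem pv_vol_empty (l : List (List (String × String))) :
    (l.flatMap pvVolOne).isEmpty =
    ((l.filter (fun s => PySem.Str.isIn "rate" (pvSid s) || PySem.Str.isIn "wpm" (pvSid s) ||
        PySem.Str.isIn "volume" (pvSid s) || PySem.Str.isIn "rms" (pvMsg s))).map pvSid).isEmpty := by
  have h := pv_empty2 (fun s => PySem.Str.isIn "rate" (pvSid s) || PySem.Str.isIn "wpm" (pvSid s))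
    (fun s => PySem.Str.isIn "volume" (pvSid s) || PySem.Str.isIn "rms" (pvMsg s)) pvSid l
  rw [show (l.flatMap pvVolOne) = l.flatMap (fun s => (if PySem.Str.isIn "rate" (pvSid s) || PySem.Str.isIn "wpm" (pvSid s) then [pvSid s] else []) ++ (if PySem.Str.isIn "volume" (pvSid s) || PySem.Str.isIn "rms" (pvMsg s) then [pvSid s] else [])) from rfl, h]
  congr 2
  apply List.filter_congr
  intro s _
  cases PySem.Str.isIn "rate" (pvSid s) <;> cases PySem.Str.isIn "wpm" (pvSid s) <;> simp

-- the drop-empty-then-dedup postpass only sees dedup and emptiness of the last bucket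
theorem pv_last_congr (l : List (String × List String)) (k : String) (v1 v2 : List String)
    (hd : PySem.List.dedup v1 = PySem.List.dedup v2) (he : v1.isEmpty = v2.isEmpty) :
    ((l ++ [(k, v1)]).filter (fun kv => !kv.2.isEmpty)).map (fun kv => (kv.1, PySem.List.dedup kv.2)) =
    ((l ++ [(k, v2)]).filter (fun kv => !kv.2.isEmpty)).map (fun kv => (kv.1, PySem.List.dedup kv.2)) := by
  rw [List.filter_append, List.filter_append, List.map_append, List.map_append]
  congr 1
  simp only [List.filter_cons, List.filter_nil]
  rw [he]
  simp only [PySem.List.dedup_eq_ofList] at hd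
  cases hv : v2.isEmpty <;> simp [hd]

theorem pv_final (signals : List (List (String × String))) :
    rubric_tags_for_signals signals = rubric_tags_for_signals_alt signals := by
  have h0 : PySem.Dict.ofList
      [("Fluency", ([] : List String)), ("Delivery", []), ("Pronunciation clarity (proxy)", []), ("Volume / pace (proxy)", [])] =
      PySem.Dict.mk [("Fluency", []), ("Delivery", []), ("Pronunciation clarity (proxy)", []), ("Volume / pace (proxy)", [])] := by decide
  simp only [rubric_tags_for_signals, rubric_tags_for_signals_alt, h0, pv_loopA, List.nil_append,
    PySem.Dict.items]
  rw [show [("Fluency", (signals.filter (fun s => PySem.Str.isIn "pause" (pvSid s) || PySem.Str.isIn "pause" (pvMsg s))).map pvSid),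
      ("Delivery", (signals.filter (fun s => PySem.Str.isIn "filler" (pvSid s))).map pvSid),
      ("Pronunciation clarity (proxy)", (signals.filter (fun s => PySem.Str.isIn "confidence" (pvSid s) || PySem.Str.isIn "pronunciation" (pvMsg s))).map pvSid),
      ("Volume / pace (proxy)", signals.flatMap pvVolOne)] =
    [("Fluency", (signals.filter (fun s => PySem.Str.isIn "pause" (pvSid s) || PySem.Str.isIn "pause" (pvMsg s))).map pvSid),
      ("Delivery", (signals.filter (fun s => PySem.Str.isIn "filler" (pvSid s))).map pvSid),
      ("Pronunciation clarity (proxy)", (signals.filter (fun s => PySem.Str.isIn "confidence" (pvSid s) || PySem.Str.isIn "pronunciation" (pvMsg s))).map pvSid)] ++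
      [("Volume / pace (proxy)", signals.flatMap pvVolOne)] from rfl,
    pv_last_congr _ _ _ _ (pv_vol_dedup signals) (pv_vol_empty signals)]
  rfl

-- ===== VERDICT (by name: the statement is the Claim_ definition above) =====
theorem rubric_tags_for_signals_spec : Claim_equal_rubric_tags_for_signals := by
  intro signals _
  exact pv_final signals
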